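-- pv_equiv track=rewrite | github.com/Typhus148/Twitter-Lupus-tracker | twitter_api_util.py | thresh_hold_calculator
-- ===== SOURCE A (Python) =====
-- def thresh_hold_calculator(max_Tweets):
--     x = int(max_Tweets / 7)
--     thresh_hold = [0] * 8
--     i = 1
--     z = 0
--     y = 0
--     while i <= 8:
--         if i is 1:
--             thresh_hold[z] = 0
--             i += 1
--             z += 1
--         else:
--             thresh_hold[z] = thresh_hold[y] + x
--             i += 1
--             z += 1
--             y += 1
--     return thresh_hold
-- ===== SOURCE B (Python) =====
-- def thresh_hold_calculator(max_Tweets):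
--     x = int(max_Tweets / 7)
--     return [k * x for k in range(8)]
-- ===== Notes on version B (the rewrite author's own statement) =====
-- stated objective: simpler
-- what changed: Replaces the while loop that fills the fixed-size array via a running-accumulator recurrence (thresh_hold[z] = thresh_hold[y] + x with three manual counters) by a direct closed form per index: each element is computed independently as k * x over the index range.
import Mathlib
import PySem

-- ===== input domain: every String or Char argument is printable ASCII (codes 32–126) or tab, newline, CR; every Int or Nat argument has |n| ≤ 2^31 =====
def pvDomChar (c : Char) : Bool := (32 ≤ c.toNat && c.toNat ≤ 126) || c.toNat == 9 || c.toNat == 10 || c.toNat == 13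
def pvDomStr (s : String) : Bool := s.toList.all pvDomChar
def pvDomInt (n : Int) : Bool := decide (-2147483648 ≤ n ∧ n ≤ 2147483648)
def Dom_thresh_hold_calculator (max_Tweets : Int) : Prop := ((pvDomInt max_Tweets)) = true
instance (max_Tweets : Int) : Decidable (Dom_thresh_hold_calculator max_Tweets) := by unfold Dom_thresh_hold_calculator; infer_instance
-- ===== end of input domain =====

-- B builds the 8-element list directly as k*x per index instead of A's while loop
-- with a running accumulator and three manual counters (return-value equivalence only).
-- Note: on the stated |n| ≤ 2^31 domain Python's int(max_Tweets / 7) equals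
-- truncating division by 7 (the float quotient is within 2^-25 of the rational,
-- far from any integer when 7 ∤ n), ported as Int.tdiv.

-- ===== PORT A =====
-- the while loop of A: fuel is a totality guard only (the loop runs exactly 8 times)
def pvALoop (x : Int) : Nat → Nat → Nat → Nat → List Int → List Int
  | 0, _, _, _, th => th
  | fuel + 1, i, z, y, th =>
    if i ≤ 8 then
      if i = 1 then pvALoop x fuel (i + 1) (z + 1) y (th.set z 0)
      else pvALoop x fuel (i + 1) (z + 1) (y + 1) (th.set z (th.getD y 0 + x))
    else th

def thresh_hold_calculator (max_Tweets : Int) : List Int :=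
  let x := max_Tweets.tdiv 7
  pvALoop x 9 1 0 0 (List.replicate 8 0)

-- ===== PORT B =====
def thresh_hold_calculator_alt (max_Tweets : Int) : List Int :=
  let x := max_Tweets.tdiv 7
  (PySem.List.pyRange 0 8 1).map (fun k => k * x)

-- ===== PRECONDITION & SPEC =====
def Spec_thresh_hold_calculator (max_Tweets : Int) (out : List Int) : Prop := out = thresh_hold_calculator_alt max_Tweets
instance (max_Tweets : Int) (out : List Int) : Decidable (Spec_thresh_hold_calculator max_Tweets out) := by unfold Spec_thresh_hold_calculator; infer_instance

-- ===== CLAIM (what is proved, stated in full; the proofs are below) =====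
def Claim_equal_thresh_hold_calculator : Prop := ∀ (max_Tweets : Int), Dom_thresh_hold_calculator max_Tweets → Spec_thresh_hold_calculator max_Tweets (thresh_hold_calculator max_Tweets)

-- ===== LEMMAS AND PROOFS =====
theorem pvBoth (x : Int) :
    pvALoop x 9 1 0 0 (List.replicate 8 0)
      = (PySem.List.pyRange 0 8 1).map (fun k => k * x) := by
  have hA : pvALoop x 9 1 0 0 (List.replicate 8 0)
      = [0, 0 + x, 0 + x + x, 0 + x + x + x, 0 + x + x + x + x, 0 + x + x + x + x + x,
         0 + x + x + x + x + x + x, 0 + x + x + x + x + x + x + x] := rfl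
  have hB : PySem.List.pyRange 0 8 1 = [0, 1, 2, 3, 4, 5, 6, 7] := by decide
  rw [hA, hB]
  simp only [List.map, List.cons.injEq, and_true]
  and_intros <;> ring

-- ===== VERDICT (by name: the statement is the Claim_ definition above) =====
theorem thresh_hold_calculator_spec : Claim_equal_thresh_hold_calculator := by
  intro n _
  show _ = _
  simp only [thresh_hold_calculator, thresh_hold_calculator_alt]
  exact pvBoth _
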